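-- pv_equiv track=rewrite | github.com/Ar2-D2/PassSuite | PassFilter/PassFilter.py | password_simplemask
-- ===== SOURCE A (Python) =====
-- import string
--
-- def password_simplemask(password):
--
--     simplemask = list()
--
--     # Detect simple and advanced masks
--     for letter in password:
--
--         if letter in string.digits:
--             if not simplemask or not simplemask[-1] == 'digit': simplemask.append('digit')
--
--         elif letter in string.ascii_lowercase:
--             if not simplemask or not simplemask[-1] == 'string': simplemask.append('string')
--
--
--         elif letter in string.ascii_uppercase:
--             if not simplemask or not simplemask[-1] == 'string': simplemask.append('string')
--
--         else:
--             if not simplemask or not simplemask[-1] == 'special': simplemask.append('special')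
--
--     # String representation of masks
--     simplemask_string = ''.join(simplemask) if len(simplemask) <= 3 else 'othermask'
--
--
--     return simplemask_string
-- ===== SOURCE B (Python) =====
-- def password_simplemask(password):
--     # Run-skipping scan: repeatedly find the end of the current class run and
--     # jump there, collecting group keys; abort as soon as a 4th group starts,
--     # since any password with more than 3 groups maps to 'othermask'.
--     def cls(c):
--         if '0' <= c <= '9':
--             return 'digit'
--         if 'a' <= c <= 'z' or 'A' <= c <= 'Z':
--             return 'string'
--         return 'special'
--     keys = []
--     s = password
--     while s and len(keys) < 4:
--         k = cls(s[0])
--         j = 1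
--         while j < len(s) and cls(s[j]) == k:
--             j += 1
--         keys.append(k)
--         s = s[j:]
--     return ''.join(keys) if len(keys) <= 3 else 'othermask'
-- ===== Notes on version B (the rewrite author's own statement) =====
-- stated objective: alternative
-- what changed: B replaces A's char-by-char loop that peeks at the accumulator's last element with a run-skipping scan: it repeatedly locates the end of the current class run, jumps past it collecting one key per run, and aborts early once a fourth group starts (any such password is 'othermask').
import Mathlib
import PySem

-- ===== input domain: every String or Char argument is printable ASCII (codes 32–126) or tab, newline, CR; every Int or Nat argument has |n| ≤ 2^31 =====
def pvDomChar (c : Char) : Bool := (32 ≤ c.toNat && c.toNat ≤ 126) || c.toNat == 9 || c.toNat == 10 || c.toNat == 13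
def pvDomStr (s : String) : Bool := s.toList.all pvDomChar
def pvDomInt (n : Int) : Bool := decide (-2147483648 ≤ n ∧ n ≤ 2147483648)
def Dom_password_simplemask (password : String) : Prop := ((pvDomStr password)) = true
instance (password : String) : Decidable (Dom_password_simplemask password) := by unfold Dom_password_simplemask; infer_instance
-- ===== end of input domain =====

-- B replaces A's char-by-char loop (which peeks at the accumulator's last element) by a
-- run-skipping scan: it repeatedly jumps to the end of the current class run, collects one
-- key per run, and stops as soon as a fourth run starts (alternative decomposition).


-- ===== PORT A =====
def password_simplemask (password : String) : String :=
  let simplemask : List String := password.toList.foldl (fun sm letter =>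
    if "0123456789".toList.contains letter then
      (if sm = [] ∨ ¬ (sm.getLast? = some "digit") then sm ++ ["digit"] else sm)
    else if "abcdefghijklmnopqrstuvwxyz".toList.contains letter then
      (if sm = [] ∨ ¬ (sm.getLast? = some "string") then sm ++ ["string"] else sm)
    else if "ABCDEFGHIJKLMNOPQRSTUVWXYZ".toList.contains letter then
      (if sm = [] ∨ ¬ (sm.getLast? = some "string") then sm ++ ["string"] else sm)
    else
      (if sm = [] ∨ ¬ (sm.getLast? = some "special") then sm ++ ["special"] else sm)) []
  if simplemask.length ≤ 3 then String.join simplemask else "othermask"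

-- ===== PORT B =====
-- Source B's cls(c): Python's single-char '0' <= c <= '9' comparisons are code-point
-- comparisons, ported exactly as toNat bounds.
def pvClsB (c : Char) : String :=
  if 48 ≤ c.toNat ∧ c.toNat ≤ 57 then "digit"
  else if (97 ≤ c.toNat ∧ c.toNat ≤ 122) ∨ (65 ≤ c.toNat ∧ c.toNat ≤ 90) then "string"
  else "special"

-- Source B's inner `while j < len(s) and cls(s[j]) == k` loop: drop the leading chars of class k
def pvSkipRun (k : String) : List Char → List Char
  | [] => []
  | d :: ds => if pvClsB d = k then pvSkipRun k ds else d :: ds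

lemma pvSkipRun_length_le (k : String) (cs : List Char) : (pvSkipRun k cs).length ≤ cs.length := by
  induction cs with
  | nil => simp [pvSkipRun]
  | cons d ds ih =>
    simp only [pvSkipRun]
    split
    · exact Nat.le_succ_of_le ih
    · simp

-- Source B's outer `while s and len(keys) < 4` loop
def pvRunLoop : List Char → List String → List String
  | [], keys => keys
  | c :: rest, keys =>
    if keys.length < 4 then
      pvRunLoop (pvSkipRun (pvClsB c) rest) (keys ++ [pvClsB c])
    else keys
termination_by cs _ => cs.length
decreasing_by exact Nat.lt_succ_of_le (pvSkipRun_length_le _ _)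

def password_simplemask_alt (password : String) : String :=
  let keys := pvRunLoop password.toList []
  if keys.length ≤ 3 then String.join keys else "othermask"

-- ===== PRECONDITION & SPEC =====
def Spec_password_simplemask (password : String) (out : String) : Prop := out = password_simplemask_alt password
instance (password : String) (out : String) : Decidable (Spec_password_simplemask password out) := by unfold Spec_password_simplemask; infer_instance

-- ===== CLAIM (what is proved, stated in full; the proofs are below) =====
def Claim_equal_password_simplemask : Prop := ∀ (password : String), Dom_password_simplemask password → Spec_password_simplemask password (password_simplemask password)

-- ===== LEMMAS AND PROOFS =====

set_option maxRecDepth 8000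

lemma cls_digit (c : Char) : ("0123456789".toList.contains c = true) ↔ (48 ≤ c.toNat ∧ c.toNat ≤ 57) := by
  have h : "0123456789".toList = ['0','1','2','3','4','5','6','7','8','9'] := rfl
  rw [h]
  constructor
  · intro h
    simp at h
    rcases h with h|h|h|h|h|h|h|h|h|h <;> subst h <;> decide
  · rintro ⟨h1, h2⟩
    have hc := Char.ofNat_toNat c
    interval_cases hn : c.toNat <;> rw [← hc] <;> decide

lemma cls_lower (c : Char) : ("abcdefghijklmnopqrstuvwxyz".toList.contains c = true) ↔ (97 ≤ c.toNat ∧ c.toNat ≤ 122) := by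
  have h : "abcdefghijklmnopqrstuvwxyz".toList = ['a','b','c','d','e','f','g','h','i','j','k','l','m','n','o','p','q','r','s','t','u','v','w','x','y','z'] := rfl
  rw [h]
  constructor
  · intro h
    simp at h
    rcases h with h|h|h|h|h|h|h|h|h|h|h|h|h|h|h|h|h|h|h|h|h|h|h|h|h|h <;> subst h <;> decide
  · rintro ⟨h1, h2⟩
    have hc := Char.ofNat_toNat c
    interval_cases hn : c.toNat <;> rw [← hc] <;> decide

lemma cls_upper (c : Char) : ("ABCDEFGHIJKLMNOPQRSTUVWXYZ".toList.contains c = true) ↔ (65 ≤ c.toNat ∧ c.toNat ≤ 90) := by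
  have h : "ABCDEFGHIJKLMNOPQRSTUVWXYZ".toList = ['A','B','C','D','E','F','G','H','I','J','K','L','M','N','O','P','Q','R','S','T','U','V','W','X','Y','Z'] := rfl
  rw [h]
  constructor
  · intro h
    simp at h
    rcases h with h|h|h|h|h|h|h|h|h|h|h|h|h|h|h|h|h|h|h|h|h|h|h|h|h|h <;> subst h <;> decide
  · rintro ⟨h1, h2⟩
    have hc := Char.ofNat_toNat c
    interval_cases hn : c.toNat <;> rw [← hc] <;> decide

lemma contains_false_of_not {s : List Char} {c : Char} {P : Prop}
    (hiff : (s.contains c = true) ↔ P) (hn : ¬ P) : s.contains c = false := by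
  cases h : s.contains c
  · rfl
  · exact absurd (hiff.1 h) hn

-- A's loop step, written via B's classifier
lemma stepA_eq (sm : List String) (letter : Char) :
    (if "0123456789".toList.contains letter then
      (if sm = [] ∨ ¬ (sm.getLast? = some "digit") then sm ++ ["digit"] else sm)
    else if "abcdefghijklmnopqrstuvwxyz".toList.contains letter then
      (if sm = [] ∨ ¬ (sm.getLast? = some "string") then sm ++ ["string"] else sm)
    else if "ABCDEFGHIJKLMNOPQRSTUVWXYZ".toList.contains letter then
      (if sm = [] ∨ ¬ (sm.getLast? = some "string") then sm ++ ["string"] else sm)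
    else
      (if sm = [] ∨ ¬ (sm.getLast? = some "special") then sm ++ ["special"] else sm))
    = (if sm = [] ∨ ¬ (sm.getLast? = some (pvClsB letter)) then sm ++ [pvClsB letter] else sm) := by
  by_cases hd : 48 ≤ letter.toNat ∧ letter.toNat ≤ 57
  · have h1 : "0123456789".toList.contains letter = true := (cls_digit letter).2 hd
    simp only [h1, if_true]
    simp [pvClsB, hd]
  · have h1 := contains_false_of_not (cls_digit letter) hd
    by_cases hl : 97 ≤ letter.toNat ∧ letter.toNat ≤ 122
    · have h2 : "abcdefghijklmnopqrstuvwxyz".toList.contains letter = true := (cls_lower letter).2 hl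
      simp only [h1, h2, Bool.false_eq_true, if_false, if_true]
      simp [pvClsB, hd, hl]
    · have h2 := contains_false_of_not (cls_lower letter) hl
      by_cases hu : 65 ≤ letter.toNat ∧ letter.toNat ≤ 90
      · have h3 : "ABCDEFGHIJKLMNOPQRSTUVWXYZ".toList.contains letter = true := (cls_upper letter).2 hu
        simp only [h1, h2, h3, Bool.false_eq_true, if_false, if_true]
        simp [pvClsB, hd, hl, hu]
      · have h3 := contains_false_of_not (cls_upper letter) hu
        simp only [h1, h2, h3, Bool.false_eq_true, if_false]
        simp [pvClsB, hd, hl, hu]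

-- collapse of a class sequence relative to the last already-emitted class
def pvColl2 (last : Option String) : List String → List String
  | [] => []
  | k :: ks => if some k = last then pvColl2 (some k) ks else k :: pvColl2 (some k) ks

lemma foldA_eq (cs : List Char) (acc : List String) :
    cs.foldl (fun sm letter =>
      (if sm = [] ∨ ¬ (sm.getLast? = some (pvClsB letter)) then sm ++ [pvClsB letter] else sm)) acc
    = acc ++ pvColl2 acc.getLast? (cs.map pvClsB) := by
  induction cs generalizing acc with
  | nil => simp [pvColl2]
  | cons c cs ih =>
    simp only [List.foldl_cons, List.map_cons, pvColl2]
    by_cases h : acc.getLast? = some (pvClsB c)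
    · have hne : acc ≠ [] := by
        intro he; rw [he] at h; simp [List.getLast?] at h
      simp only [h, hne, false_or, not_true_eq_false, if_false, if_true, ih]
    · have : some (pvClsB c) = acc.getLast? ↔ False := by
        constructor
        · intro he; exact h he.symm
        · intro f; exact f.elim
      simp only [h, not_false_eq_true, or_true, if_true, ih,
        List.getLast?_append, List.getLast?_singleton, Option.some_or, this, if_false,
        List.append_assoc, List.singleton_append]

lemma skip_coll (k : String) (rest : List Char) :
    pvColl2 (some k) (rest.map pvClsB) = pvColl2 none ((pvSkipRun k rest).map pvClsB) := by
  induction rest with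
  | nil => simp [pvSkipRun, pvColl2]
  | cons d ds ih =>
    by_cases h : pvClsB d = k
    · simp only [List.map_cons, pvColl2, pvSkipRun, h, if_true]
      simpa [h] using ih
    · have h' : ¬ (some (pvClsB d) = some k) := by simpa using h
      simp [pvColl2, pvSkipRun, h, h']

lemma take_pos_cons (n : Nat) (x : String) (l : List String) (h : 0 < n) :
    (x :: l).take n = x :: l.take (n - 1) := by
  cases n with
  | zero => omega
  | succ m => simp

lemma runLoop_eq (cs : List Char) (keys : List String) (hk : keys.length ≤ 4) :
    pvRunLoop cs keys = keys ++ (pvColl2 none (cs.map pvClsB)).take (4 - keys.length) := by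
  induction cs, keys using pvRunLoop.induct with
  | case1 keys => simp [pvRunLoop, pvColl2]
  | case2 c rest keys hlen ih =>
    have hk1 : (keys ++ [pvClsB c]).length ≤ 4 := by
      simp; omega
    rw [pvRunLoop, if_pos hlen, ih hk1]
    have hcoll : pvColl2 none ((c :: rest).map pvClsB)
        = pvClsB c :: pvColl2 none ((pvSkipRun (pvClsB c) rest).map pvClsB) := by
      simp [pvColl2, skip_coll]
    rw [hcoll, take_pos_cons _ _ _ (by omega), List.append_assoc, List.singleton_append]
    congr 3
    simp
    omega
  | case3 c rest keys hlen =>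
    have : keys.length = 4 := by omega
    rw [pvRunLoop, if_neg hlen, this]
    simp

-- ===== VERDICT (by name: the statement is the Claim_ definition above) =====
theorem password_simplemask_spec : Claim_equal_password_simplemask := by
  intro password _
  unfold Spec_password_simplemask password_simplemask password_simplemask_alt
  have hstep : (fun (sm : List String) (letter : Char) =>
      if "0123456789".toList.contains letter then
        (if sm = [] ∨ ¬ (sm.getLast? = some "digit") then sm ++ ["digit"] else sm)
      else if "abcdefghijklmnopqrstuvwxyz".toList.contains letter then
        (if sm = [] ∨ ¬ (sm.getLast? = some "string") then sm ++ ["string"] else sm)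
      else if "ABCDEFGHIJKLMNOPQRSTUVWXYZ".toList.contains letter then
        (if sm = [] ∨ ¬ (sm.getLast? = some "string") then sm ++ ["string"] else sm)
      else
        (if sm = [] ∨ ¬ (sm.getLast? = some "special") then sm ++ ["special"] else sm))
      = (fun (sm : List String) (letter : Char) =>
        if sm = [] ∨ ¬ (sm.getLast? = some (pvClsB letter)) then sm ++ [pvClsB letter] else sm) := by
    funext sm letter; exact stepA_eq sm letter
  rw [hstep, foldA_eq, runLoop_eq _ _ (by simp)]
  set g := pvColl2 none (password.toList.map pvClsB) with hg
  simp only [List.getLast?_nil, List.nil_append, Nat.sub_zero, List.length_nil]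
  by_cases hlen : g.length ≤ 3
  · rw [List.take_of_length_le (by omega)]
  · have h4 : (g.take 4).length = 4 := by
      rw [List.length_take]; omega
    rw [if_neg (by omega), if_neg (by omega)]
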